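-- pv_equiv track=rewrite | github.com/joshuamegnauth54/JOBSPLS | Python/jobspls/sort/insertion.py | insertion_idx_bk
-- ===== SOURCE A (Python) =====
-- def insertion_idx_bk(vec, insert):
--     # Starting from the back
--     check_loc: int = len(vec) - 1
--
--     while check_loc >= 0:
--         # If the item is larger than the variant at the current
--         # index, then it should be placed behind the current item
--         if insert > vec[check_loc]:
--             check_loc = check_loc + 1
--             break
--         check_loc = check_loc - 1
--     # If Zero. The length of the collection is 0 or the item is the smallest
--     return check_loc
-- ===== SOURCE B (Python) =====
-- def insertion_idx_bk(vec, insert):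
--     # Forward single pass: remember 1 + last index whose element is below `insert`.
--     idx = -1
--     for i, x in enumerate(vec):
--         if x < insert:
--             idx = i + 1
--     return idx
-- ===== Notes on version B (the rewrite author's own statement) =====
-- stated objective: alternative
-- what changed: Replaces the backward while-loop with early break by a forward enumerate pass that keeps 1 + the last index whose element is below insert in an accumulator.
import Mathlib
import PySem

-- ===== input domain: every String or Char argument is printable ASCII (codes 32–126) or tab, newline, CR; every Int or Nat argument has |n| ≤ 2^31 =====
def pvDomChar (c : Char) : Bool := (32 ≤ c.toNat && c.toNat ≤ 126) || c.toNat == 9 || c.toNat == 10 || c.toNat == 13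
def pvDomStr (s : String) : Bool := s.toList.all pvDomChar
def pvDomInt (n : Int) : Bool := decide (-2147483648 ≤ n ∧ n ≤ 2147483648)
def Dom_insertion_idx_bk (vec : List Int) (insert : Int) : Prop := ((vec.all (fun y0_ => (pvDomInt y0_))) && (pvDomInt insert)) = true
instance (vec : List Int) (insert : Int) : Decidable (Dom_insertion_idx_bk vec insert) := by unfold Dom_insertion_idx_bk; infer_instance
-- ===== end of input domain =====

-- B replaces A's backward scan with early break by a forward enumerate pass with an
-- accumulator (1 + last index whose element is below insert); alternative, same O(n).

-- ===== PORT A =====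
-- while loop of A: argument n is check_loc + 1 (so n = 0 means check_loc = -1, loop exits).
-- The index check_loc = n is always in range (0 ≤ n < len), so the `.getD 0` default never fires.
def pvLoopA (vec : List Int) (insert : Int) : Nat → Int
  | 0 => -1
  | n + 1 =>
    if insert > (PySem.List.pyGet? vec (n : Int)).getD 0 then (n : Int) + 1
    else pvLoopA vec insert n

def insertion_idx_bk (vec : List Int) (insert : Int) : Int :=
  -- check_loc starts at len(vec) - 1, i.e. n = len(vec)
  pvLoopA vec insert vec.length

-- ===== PORT B =====
def insertion_idx_bk_alt (vec : List Int) (insert : Int) : Int :=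
  (PySem.List.enumerate vec).foldl (fun idx p => if p.2 < insert then p.1 + 1 else idx) (-1)

-- ===== PRECONDITION & SPEC =====
def Spec_insertion_idx_bk (vec : List Int) (insert : Int) (out : Int) : Prop := out = insertion_idx_bk_alt vec insert
instance (vec : List Int) (insert : Int) (out : Int) : Decidable (Spec_insertion_idx_bk vec insert out) := by unfold Spec_insertion_idx_bk; infer_instance

-- ===== CLAIM (what is proved, stated in full; the proofs are below) =====
def Claim_equal_insertion_idx_bk : Prop := ∀ (vec : List Int) (insert : Int), Dom_insertion_idx_bk vec insert → Spec_insertion_idx_bk vec insert (insertion_idx_bk vec insert)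

-- ===== LEMMAS AND PROOFS =====

-- The loop only looks at indices < n, so a trailing element is invisible while n ≤ xs.length.
theorem pvLoopA_append (xs : List Int) (x : Int) (insert : Int) (n : Nat) (h : n ≤ xs.length) :
    pvLoopA (xs ++ [x]) insert n = pvLoopA xs insert n := by
  induction n with
  | zero => rfl
  | succ n ih =>
    have hn : n < xs.length := h
    simp only [pvLoopA, PySem.List.pyGet?_natCast, List.getElem?_append_left hn,
      ih (Nat.le_of_lt hn)]

theorem pvBoth_eq (insert : Int) (vec : List Int) :
    insertion_idx_bk vec insert = insertion_idx_bk_alt vec insert := by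
  induction vec using List.reverseRecOn with
  | nil => rfl
  | append_singleton xs x ih =>
    have hA : insertion_idx_bk (xs ++ [x]) insert =
        if insert > x then (xs.length : Int) + 1 else insertion_idx_bk xs insert := by
      simp only [insertion_idx_bk, List.length_append, List.length_cons, List.length_nil,
        pvLoopA, PySem.List.pyGet?_natCast]
      rw [List.getElem?_append_right (Nat.le_refl _)]
      simp [pvLoopA_append xs x insert xs.length (Nat.le_refl _)]
    have hB : insertion_idx_bk_alt (xs ++ [x]) insert =
        if x < insert then (xs.length : Int) + 1 else insertion_idx_bk_alt xs insert := by
      simp [insertion_idx_bk_alt, PySem.List.enumerate_append, PySem.List.enumerate_cons,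
        PySem.List.enumerate_nil]
    rw [hA, hB, ih]

-- ===== VERDICT (by name: the statement is the Claim_ definition above) =====
theorem insertion_idx_bk_spec : Claim_equal_insertion_idx_bk := by
  intro vec insert _
  exact pvBoth_eq insert vec
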